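-- pv_equiv track=rewrite | github.com/TheL0L/DataMining_Assignment03 | bfr.py | collapse_mapping
-- ===== SOURCE A (Python) =====
-- def collapse_mapping(mapping: dict[int, int]) -> dict[int, int]:
--     collapsed = {}
--     for swapped in mapping:
--         current = swapped
--         while current in mapping and current != mapping[current]:
--             current = mapping[current]
--         collapsed[swapped] = current
--     return collapsed
-- ===== SOURCE B (Python) =====
-- def collapse_mapping(mapping: dict[int, int]) -> dict[int, int]:
--     # Memoized resolution: cache each visited node's final target (path compression).
--     cache = {}
--     collapsed = {}
--     for key in mapping:
--         path = []
--         current = key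
--         while current not in cache and current in mapping and current != mapping[current]:
--             path.append(current)
--             current = mapping[current]
--         result = cache.get(current, current)
--         for node in path:
--             cache[node] = result
--         collapsed[key] = result
--     return collapsed
-- ===== Notes on version B (the rewrite author's own statement) =====
-- stated objective: alternative
-- what changed: B resolves chains through a shared memo cache (path compression) so each node's final target is computed once and reused, instead of A's independent full chain walk per key; on the random short-chain timing inputs this is not measurably faster.
import Mathlib
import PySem

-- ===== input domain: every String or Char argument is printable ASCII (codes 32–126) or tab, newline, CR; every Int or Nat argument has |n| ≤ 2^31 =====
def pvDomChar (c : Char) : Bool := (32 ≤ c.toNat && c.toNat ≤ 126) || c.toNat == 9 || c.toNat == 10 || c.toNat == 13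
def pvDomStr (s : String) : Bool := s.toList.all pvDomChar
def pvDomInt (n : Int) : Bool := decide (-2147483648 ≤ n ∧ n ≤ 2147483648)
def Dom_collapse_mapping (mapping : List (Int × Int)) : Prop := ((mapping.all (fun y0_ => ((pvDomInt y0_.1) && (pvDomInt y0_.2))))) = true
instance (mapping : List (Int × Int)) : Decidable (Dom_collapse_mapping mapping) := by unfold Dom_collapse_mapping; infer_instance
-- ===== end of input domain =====

-- B resolves chains through a shared memo cache (path compression) instead of A's independent
-- chain walk per key; equal output on all acyclic mappings (Pre_), where A terminates.

-- ===== PORT A =====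
-- while current in mapping and current != mapping[current]: current = mapping[current]
-- (fuel is only a totality guard; under Pre_ the loop stops within d.keys.length steps)
def chaseA (d : PySem.Dict Int Int) : Nat → Int → Int
  | 0, cur => cur
  | fuel + 1, cur =>
    if d.contains cur = true ∧ d.getD cur cur ≠ cur then chaseA d fuel (d.getD cur cur) else cur

def collapse_mapping (mapping : List (Int × Int)) : List (Int × Int) :=
  let d := PySem.Dict.ofList mapping
  (d.keys.foldl (fun collapsed k => collapsed.insert k (chaseA d (d.keys.length + 1) k))
    PySem.Dict.empty).items

-- ===== PORT B =====
-- B's while loop: walk the chain collecting `path` until the node is cached, absent, or a fixed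
-- point; then cache every path node at the resolved target. (fuel is only a totality guard.)
def resolveB (d : PySem.Dict Int Int) :
    Nat → List Int → PySem.Dict Int Int → Int → PySem.Dict Int Int × Int
  | 0, path, cache, cur =>
    let res := cache.getD cur cur
    (path.foldl (fun c p => c.insert p res) cache, res)
  | fuel + 1, path, cache, cur =>
    if cache.contains cur = false ∧ d.contains cur = true ∧ d.getD cur cur ≠ cur then
      resolveB d fuel (path ++ [cur]) cache (d.getD cur cur)
    else
      let res := cache.getD cur cur
      (path.foldl (fun c p => c.insert p res) cache, res)

def collapse_mapping_alt (mapping : List (Int × Int)) : List (Int × Int) :=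
  let d := PySem.Dict.ofList mapping
  ((d.keys.foldl (fun s k =>
      let r := resolveB d (d.keys.length + 1) [] s.1 k
      (r.1, s.2.insert k r.2))
    (PySem.Dict.empty, PySem.Dict.empty)).2).items

-- ===== PRECONDITION & SPEC =====
-- one application of the mapping, read as a function (absent keys map to themselves)
def pvStep (d : PySem.Dict Int Int) (x : Int) : Int := d.getD x x

-- Pre_ excludes mappings whose lookup function has a nontrivial cycle among the keys
-- (e.g. {1: 2, 2: 1}): on those the Python A never returns (its while loop runs forever).
def Pre_collapse_mapping (mapping : List (Int × Int)) : Prop :=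
  ∀ k ∈ (PySem.Dict.ofList mapping).keys,
    ∀ j ∈ List.range (PySem.Dict.ofList mapping).keys.length,
      (pvStep (PySem.Dict.ofList mapping))^[j + 1] k = k →
        pvStep (PySem.Dict.ofList mapping) k = k
instance (mapping : List (Int × Int)) : Decidable (Pre_collapse_mapping mapping) := by
  unfold Pre_collapse_mapping; infer_instance

def pvWitness_collapse_mapping : (List (Int × Int)) := ([(1, 2), (2, 2), (3, 3), (5, 7)])

def Spec_collapse_mapping (mapping : List (Int × Int)) (out : List (Int × Int)) : Prop := out = collapse_mapping_alt mapping
instance (mapping : List (Int × Int)) (out : List (Int × Int)) : Decidable (Spec_collapse_mapping mapping out) := by unfold Spec_collapse_mapping; infer_instance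

-- ===== CLAIM (what is proved, stated in full; the proofs are below) =====
def Claim_equal_collapse_mapping : Prop := ∀ (mapping : List (Int × Int)), Dom_collapse_mapping mapping → Pre_collapse_mapping mapping → Spec_collapse_mapping mapping (collapse_mapping mapping)

-- ===== LEMMAS AND PROOFS =====

-- the acyclicity hypothesis, stated over the dict
def pvAcyclic (d : PySem.Dict Int Int) : Prop :=
  ∀ k ∈ d.keys, ∀ j ∈ List.range d.keys.length,
    (pvStep d)^[j + 1] k = k → pvStep d k = k

theorem pvCond_iff (d : PySem.Dict Int Int) (cur : Int) :
    (d.contains cur = true ∧ d.getD cur cur ≠ cur) ↔ pvStep d cur ≠ cur := by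
  unfold pvStep
  constructor
  · rintro ⟨-, h⟩; exact h
  · intro h
    refine ⟨?_, h⟩
    by_cases hc : d.contains cur = true
    · exact hc
    · exact absurd (PySem.Dict.getD_of_not_contains d cur (by simpa using hc)) h

theorem pvNonfixed_mem_keys (d : PySem.Dict Int Int) (x : Int) (h : pvStep d x ≠ x) :
    x ∈ d.keys := by
  have hc := ((pvCond_iff d x).2 h).1
  exact (PySem.Dict.contains_iff_mem_keys d x).1 hc

-- under acyclicity, every chain stabilizes within d.keys.length steps
theorem pvStabilize (d : PySem.Dict Int Int) (hnd : d.keys.Nodup) (hac : pvAcyclic d) (x : Int) :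
    pvStep d ((pvStep d)^[d.keys.length] x) = (pvStep d)^[d.keys.length] x := by
  set f := pvStep d with hf
  set N := d.keys.length with hN
  by_contra hfix
  have hstep : ∀ i ≤ N, f (f^[i] x) ≠ f^[i] x := by
    intro i hi hEq
    apply hfix
    have : f^[N] x = f^[i] x := by
      have : f^[(N - i) + i] x = f^[N - i] (f^[i] x) := Function.iterate_add_apply f _ _ x
      rw [show N = (N - i) + i by omega, this, Function.iterate_fixed hEq]
    rw [this]; exact hEq
  have hmaps : ∀ i ∈ Finset.range (N + 1), f^[i] x ∈ d.keys.toFinset := by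
    intro i hi
    simp only [Finset.mem_range] at hi
    exact List.mem_toFinset.2 (pvNonfixed_mem_keys d _ (hstep i (by omega)))
  have hcard : d.keys.toFinset.card < (Finset.range (N + 1)).card := by
    rw [List.toFinset_card_of_nodup hnd, Finset.card_range]; omega
  obtain ⟨i, hi, j, hj, hne, heq⟩ :=
    Finset.exists_ne_map_eq_of_card_lt_of_maps_to hcard hmaps
  simp only [Finset.mem_range] at hi hj
  have key : ∀ a b : ℕ, a < b → b < N + 1 → f^[b] x = f^[a] x → False := by
    intro a b hab hbN hEq
    have hcyc : f^[(b - a - 1) + 1] (f^[a] x) = f^[a] x := by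
      have h1 : f^[(b - a) + a] x = f^[b - a] (f^[a] x) := Function.iterate_add_apply f _ _ x
      rw [show (b - a - 1) + 1 = b - a by omega, ← h1, show (b - a) + a = b by omega]
      exact hEq
    have hmem : f^[a] x ∈ d.keys := pvNonfixed_mem_keys d _ (hstep a (by omega))
    have hNpos : 0 < N := by
      rw [hN]; rcases hk : d.keys with _ | _
      · rw [hk] at hmem; simp at hmem
      · simp
    exact hstep a (by omega) (hac _ hmem (b - a - 1) (List.mem_range.2 (by omega)) hcyc)
  rcases lt_trichotomy i j with hlt | hEq | hgt
  · exact key i j hlt hj heq.symm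
  · exact absurd hEq hne
  · exact key j i hgt hi heq

-- resolving is invariant under one step
theorem pvRes_step (d : PySem.Dict Int Int) (hnd : d.keys.Nodup) (hac : pvAcyclic d) (x : Int) :
    (pvStep d)^[d.keys.length] (pvStep d x) = (pvStep d)^[d.keys.length] x := by
  rw [← Function.iterate_succ_apply, Function.iterate_succ_apply']
  exact pvStabilize d hnd hac x

theorem chaseA_eq_iterate (d : PySem.Dict Int Int) :
    ∀ (fuel : Nat) (x : Int), pvStep d ((pvStep d)^[fuel] x) = (pvStep d)^[fuel] x →
      chaseA d fuel x = (pvStep d)^[fuel] x := by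
  intro fuel
  induction fuel with
  | zero => intro x _; simp [chaseA]
  | succ n ih =>
    intro x hfix
    by_cases h : pvStep d x ≠ x
    · have hcond := (pvCond_iff d x).2 h
      rw [chaseA, if_pos hcond]
      have hs : d.getD x x = pvStep d x := rfl
      rw [hs, ih (pvStep d x) (by rwa [← Function.iterate_succ_apply]),
        ← Function.iterate_succ_apply]
    · rw [not_not] at h
      rw [chaseA, if_neg (fun hc => ((pvCond_iff d x).1 hc) h)]
      exact (Function.iterate_fixed h _).symm

theorem chaseA_correct (d : PySem.Dict Int Int) (hnd : d.keys.Nodup) (hac : pvAcyclic d)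
    (x : Int) : chaseA d (d.keys.length + 1) x = (pvStep d)^[d.keys.length] x := by
  have hNfix := pvStabilize d hnd hac x
  have hfix : pvStep d ((pvStep d)^[d.keys.length + 1] x) = (pvStep d)^[d.keys.length + 1] x := by
    rw [Function.iterate_succ_apply', hNfix, hNfix]
  rw [chaseA_eq_iterate d _ x hfix, Function.iterate_succ_apply', hNfix]

-- invariant: every cached value is the resolved target of its key
def pvInv (d cache : PySem.Dict Int Int) : Prop :=
  ∀ k v, cache.get? k = some v → v = (pvStep d)^[d.keys.length] k

theorem pvFoldl_insert_get? (res : Int) :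
    ∀ (path : List Int) (cache : PySem.Dict Int Int) (k : Int) (v : Int),
      (path.foldl (fun c p => c.insert p res) cache).get? k = some v →
      (k ∈ path ∧ v = res) ∨ cache.get? k = some v := by
  intro path
  induction path with
  | nil => intro cache k v h; exact Or.inr h
  | cons p ps ih =>
    intro cache k v h
    rcases ih (cache.insert p res) k v h with ⟨hm, hv⟩ | h2
    · exact Or.inl ⟨List.mem_cons_of_mem _ hm, hv⟩
    · rw [PySem.Dict.get?_insert] at h2
      by_cases hk : k = p
      · rw [if_pos hk] at h2
        exact Or.inl ⟨hk ▸ List.mem_cons_self, (Option.some_injective _ h2).symm⟩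
      · rw [if_neg hk] at h2
        exact Or.inr h2

theorem resolveB_correct (d : PySem.Dict Int Int) (hnd : d.keys.Nodup) (hac : pvAcyclic d) :
    ∀ (fuel : Nat) (path : List Int) (cache : PySem.Dict Int Int) (cur : Int),
      pvInv d cache →
      (∀ p ∈ path, (pvStep d)^[d.keys.length] p = (pvStep d)^[d.keys.length] cur) →
      (∃ m, m < fuel ∧ pvStep d ((pvStep d)^[m] cur) = (pvStep d)^[m] cur) →
      (resolveB d fuel path cache cur).2 = (pvStep d)^[d.keys.length] cur ∧
        pvInv d (resolveB d fuel path cache cur).1 := by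
  intro fuel
  induction fuel with
  | zero => rintro _ _ _ _ _ ⟨m, hm, -⟩; omega
  | succ n ih =>
    intro path cache cur hinv hpath hfuel
    by_cases hcond : cache.contains cur = false ∧ d.contains cur = true ∧ d.getD cur cur ≠ cur
    · -- loop step
      obtain ⟨m, hm, hmfix⟩ := hfuel
      have hstep : pvStep d cur ≠ cur := hcond.2.2
      have hm0 : m ≠ 0 := by rintro rfl; exact hstep hmfix
      rw [resolveB, if_pos hcond]
      have hres : (pvStep d)^[d.keys.length] (pvStep d cur) = (pvStep d)^[d.keys.length] cur :=
        pvRes_step d hnd hac cur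
      have := ih (path ++ [cur]) cache (d.getD cur cur) hinv
        (by
          intro p hp
          rcases List.mem_append.1 hp with h1 | h1
          · rw [show (d.getD cur cur : Int) = pvStep d cur from rfl, hres]; exact hpath p h1
          · rw [List.mem_singleton.1 h1,
              show (d.getD cur cur : Int) = pvStep d cur from rfl, hres])
        ⟨m - 1, by omega, by
          have h2 : (pvStep d)^[m - 1] (pvStep d cur) = (pvStep d)^[m] cur := by
            rw [← Function.iterate_succ_apply]; congr 1; omega
          rw [show (d.getD cur cur : Int) = pvStep d cur from rfl, h2]
          exact hmfix⟩
      rw [show (d.getD cur cur : Int) = pvStep d cur from rfl, hres] at this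
      exact this
    · -- stop: cached, absent, or fixed point
      rw [resolveB, if_neg hcond]
      have hres : cache.getD cur cur = (pvStep d)^[d.keys.length] cur := by
        rcases hg : cache.get? cur with _ | v
        · -- not cached, so the loop condition failed on the mapping side: cur is a fixed point
          rw [PySem.Dict.getD_of_get?_eq_none cache cur hg]
          have hnc : cache.contains cur = false :=
            (PySem.Dict.get?_eq_none_iff_contains cache cur).1 hg
          have hfix : pvStep d cur = cur := by
            by_contra hne
            exact hcond ⟨hnc, (pvCond_iff d cur).2 hne⟩
          exact (Function.iterate_fixed hfix _).symm
        · rw [PySem.Dict.getD_of_get?_eq_some cache cur hg]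
          exact hinv cur v hg
      refine ⟨hres, ?_⟩
      intro k v hk
      rcases pvFoldl_insert_get? _ path cache k v hk with ⟨hmem, rfl⟩ | h2
      · rw [hres, ← hpath k hmem]
      · exact hinv k v h2

-- the two folds over the keys agree
theorem pvFold_eq (d : PySem.Dict Int Int) (hnd : d.keys.Nodup) (hac : pvAcyclic d) :
    ∀ (ks : List Int) (cache out : PySem.Dict Int Int), pvInv d cache →
      ks.foldl (fun collapsed k => collapsed.insert k (chaseA d (d.keys.length + 1) k)) out =
      (ks.foldl (fun s k =>
          let r := resolveB d (d.keys.length + 1) [] s.1 k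
          (r.1, s.2.insert k r.2)) (cache, out)).2 := by
  intro ks
  induction ks with
  | nil => intro cache out _; rfl
  | cons k ks ih =>
    intro cache out hinv
    have hr := resolveB_correct d hnd hac (d.keys.length + 1) [] cache k hinv
      (by intro p hp; simp at hp)
      ⟨d.keys.length, by omega, pvStabilize d hnd hac k⟩
    simp only [List.foldl_cons]
    rw [chaseA_correct d hnd hac k, ← hr.1]
    exact ih (resolveB d (d.keys.length + 1) [] cache k).1 _ hr.2

-- ===== VERDICT (by name: the statement is the Claim_ definition above) =====
theorem collapse_mapping_spec : Claim_equal_collapse_mapping := by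
  intro mapping _ hpre
  unfold Spec_collapse_mapping collapse_mapping collapse_mapping_alt
  have hnd : (PySem.Dict.ofList mapping : PySem.Dict Int Int).keys.Nodup :=
    PySem.Dict.nodup_keys_ofList mapping
  have hac : pvAcyclic (PySem.Dict.ofList mapping) := hpre
  have hinv : pvInv (PySem.Dict.ofList mapping) PySem.Dict.empty := by
    intro k v h; rw [PySem.Dict.get?_empty] at h; exact absurd h (by simp)
  simp only []
  rw [pvFold_eq (PySem.Dict.ofList mapping) hnd hac _ PySem.Dict.empty PySem.Dict.empty hinv]
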